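-- pv_equiv track=rewrite | github.com/giulio7771/ss_criptografia_aes | AES/AES.py | rodada3
-- ===== SOURCE A (Python) =====
-- def rodada3(matriz):
--     result = []
--     nova_matriz = []
--     for y in range(4):
--         nova_linha = []
--         for x in range(4):
--             nova_linha.append(matriz[x][y])
--         nova_matriz.append(nova_linha)
--     result.append(nova_matriz[0])
--     for q in range(1, 4):
--         palavraRotacionada = rotWord(nova_matriz[q])
--         for x in range(q - 1):
--             palavraRotacionada = rotWord(palavraRotacionada)
--         result.append(palavraRotacionada)
--     return result
--
-- def rotWord(palavra):
--     # o primeiro byte passa a ser o ultimo na lista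
--     result = [0 for x in range(0,4)]
--     primeiro = palavra[0]
--     for i in range(1,4):
--         result[i - 1] = palavra[i]
--     result[3] = primeiro
--     return result
-- ===== SOURCE B (Python) =====
-- def rodada3(matriz):
--     # Transpose once, then rotate row q left by q via slicing (closed form
--     # instead of applying one-step rotWord q times).
--     out = []
--     for y in range(4):
--         col = [matriz[x][y] for x in range(4)]
--         out.append(col[y:] + col[:y])
--     return out
-- ===== Notes on version B (the rewrite author's own statement) =====
-- stated objective: simpler
-- what changed: Single transpose pass with each row q rotated left by q in closed form via slicing, replacing the separate transpose build, the rotWord helper with element-by-element assignment, and the loop that applies rotWord q times.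
import Mathlib
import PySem

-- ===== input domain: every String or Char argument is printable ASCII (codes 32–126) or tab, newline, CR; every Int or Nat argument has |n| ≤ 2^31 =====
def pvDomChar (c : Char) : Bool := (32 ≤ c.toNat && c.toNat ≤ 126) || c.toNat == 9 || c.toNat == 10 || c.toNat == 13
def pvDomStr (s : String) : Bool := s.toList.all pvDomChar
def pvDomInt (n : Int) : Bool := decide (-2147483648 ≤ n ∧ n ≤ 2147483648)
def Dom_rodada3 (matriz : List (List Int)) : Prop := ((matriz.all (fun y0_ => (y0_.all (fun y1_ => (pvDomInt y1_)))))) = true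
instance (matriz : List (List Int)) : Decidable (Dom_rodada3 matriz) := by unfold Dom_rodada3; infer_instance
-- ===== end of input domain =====

-- B rewrites A's transpose + repeated one-step rotWord as a single transpose pass with
-- closed-form slice rotation; equal on all inputs where A returns (Pre_ excludes IndexError).

-- ===== PORT A =====
-- matriz[x][y] with the in-range guarantee of Pre_ (pyGet? = none is Python's IndexError,
-- excluded by Pre_; getD supplies an irrelevant default outside Pre_)
def pyRow (matriz : List (List Int)) (x : Int) : List Int :=
  (PySem.List.pyGet? matriz x).getD []

def pyAt (l : List Int) (i : Int) : Int :=
  (PySem.List.pyGet? l i).getD 0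

def rotWord (palavra : List Int) : List Int :=
  let result := (List.range 4).map (fun _ => (0 : Int))      -- [0 for x in range(0,4)]
  let primeiro := pyAt palavra 0
  let result := (PySem.List.pyRange 1 4 1).foldl
    (fun r i => r.set (i - 1).toNat (pyAt palavra i)) result -- result[i-1] = palavra[i]
  result.set 3 primeiro                                      -- result[3] = primeiro

def rodada3 (matriz : List (List Int)) : List (List Int) :=
  let nova_matriz := (List.range 4).map (fun y =>
    (List.range 4).map (fun x => pyAt (pyRow matriz (x : Int)) (y : Int)))
  let result : List (List Int) := [(PySem.List.pyGet? nova_matriz 0).getD []]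
  (PySem.List.pyRange 1 4 1).foldl (fun result q =>
    let p := rotWord (((PySem.List.pyGet? nova_matriz q)).getD [])
    let p := (PySem.List.pyRange 0 (q - 1) 1).foldl (fun p _ => rotWord p) p
    result ++ [p]) result

-- ===== PORT B =====
def rodada3_alt (matriz : List (List Int)) : List (List Int) :=
  (List.range 4).map (fun (y : Nat) =>
    let col := (List.range 4).map (fun x => pyAt (pyRow matriz (x : Int)) (y : Int))
    -- col[y:] + col[:y] (y : Nat, 0 ≤ y < 4 ≤ len col, so the slices are drop/take)
    col.drop y ++ col.take y)

-- ===== PRECONDITION & SPEC =====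
-- Pre_ excludes exactly the inputs where A raises IndexError: fewer than 4 rows, or one of
-- the first 4 rows shorter than 4.
def Pre_rodada3 (matriz : List (List Int)) : Prop :=
  4 ≤ matriz.length ∧ ∀ r ∈ matriz.take 4, 4 ≤ r.length
instance (matriz : List (List Int)) : Decidable (Pre_rodada3 matriz) := by
  unfold Pre_rodada3; infer_instance

def pvWitness_rodada3 : List (List Int) :=
  [[1, 2, 3, 4], [5, 6, 7, 8], [9, 10, 11, 12], [13, 14, 15, 16]]

def Spec_rodada3 (matriz : List (List Int)) (out : List (List Int)) : Prop := out = rodada3_alt matriz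
instance (matriz : List (List Int)) (out : List (List Int)) : Decidable (Spec_rodada3 matriz out) := by unfold Spec_rodada3; infer_instance

-- ===== CLAIM (what is proved, stated in full; the proofs are below) =====
def Claim_equal_rodada3 : Prop := ∀ (matriz : List (List Int)), Dom_rodada3 matriz → Pre_rodada3 matriz → Spec_rodada3 matriz (rodada3 matriz)

-- ===== LEMMAS AND PROOFS =====

-- ===== VERDICT (by name: the statement is the Claim_ definition above) =====
theorem rodada3_spec : Claim_equal_rodada3 := by
  intro m _ pre
  obtain ⟨hl, hr⟩ := pre
  rcases m with _ | ⟨r0, _ | ⟨r1, _ | ⟨r2, _ | ⟨r3, rest⟩⟩⟩⟩ <;>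
    try (exfalso; simp only [List.length] at hl; omega)
  have h0 : 4 ≤ r0.length := hr r0 (by simp)
  have h1 : 4 ≤ r1.length := hr r1 (by simp)
  have h2 : 4 ≤ r2.length := hr r2 (by simp)
  have h3 : 4 ≤ r3.length := hr r3 (by simp)
  rcases r0 with _ | ⟨a0, _ | ⟨a1, _ | ⟨a2, _ | ⟨a3, t0⟩⟩⟩⟩ <;> try (exfalso; simp only [List.length] at h0; omega)
  rcases r1 with _ | ⟨b0, _ | ⟨b1, _ | ⟨b2, _ | ⟨b3, t1⟩⟩⟩⟩ <;> try (exfalso; simp only [List.length] at h1; omega)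
  rcases r2 with _ | ⟨c0, _ | ⟨c1, _ | ⟨c2, _ | ⟨c3, t2⟩⟩⟩⟩ <;> try (exfalso; simp only [List.length] at h2; omega)
  rcases r3 with _ | ⟨d0, _ | ⟨d1, _ | ⟨d2, _ | ⟨d3, t3⟩⟩⟩⟩ <;> try (exfalso; simp only [List.length] at h3; omega)
  exact rfl
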